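-- pv_equiv track=rewrite | github.com/Ohjinn/algo-py | programmers/level1/음양더하기.py | solution
-- ===== SOURCE A (Python) =====
-- def solution(absolutes, signs):
--     answer = 0
--     for idx in range(len(absolutes)):
--         if not signs[idx]:
--             answer -= absolutes[idx]
--         else:
--             answer += absolutes[idx]
--     return answer
-- ===== SOURCE B (Python) =====
-- def solution(absolutes, signs):
--     def go(lo, hi):
--         n = hi - lo
--         if n == 0:
--             return 0
--         if n == 1:
--             return absolutes[lo] if signs[lo] else -absolutes[lo]
--         mid = (lo + hi) // 2
--         return go(lo, mid) + go(mid, hi)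
--     return go(0, len(absolutes))
-- ===== Notes on version B (the rewrite author's own statement) =====
-- stated objective: alternative
-- what changed: B computes the signed sum by divide-and-conquer recursion on index ranges (split at the midpoint, signed leaf at each single index) instead of A's left-to-right loop with one accumulator.
import Mathlib
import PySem

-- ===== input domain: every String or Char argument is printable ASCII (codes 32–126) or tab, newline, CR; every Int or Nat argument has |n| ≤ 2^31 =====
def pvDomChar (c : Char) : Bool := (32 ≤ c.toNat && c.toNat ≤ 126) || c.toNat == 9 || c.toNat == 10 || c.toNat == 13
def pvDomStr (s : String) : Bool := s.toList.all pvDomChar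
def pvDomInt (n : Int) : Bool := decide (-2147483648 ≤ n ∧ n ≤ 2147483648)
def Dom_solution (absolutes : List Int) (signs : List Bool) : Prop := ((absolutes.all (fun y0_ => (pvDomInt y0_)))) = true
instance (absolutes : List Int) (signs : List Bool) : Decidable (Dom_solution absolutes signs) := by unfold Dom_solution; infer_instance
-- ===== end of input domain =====

-- B computes the signed sum by divide-and-conquer recursion on index ranges instead of
-- A's left-to-right accumulator loop (alternative decomposition, same O(n) cost).

-- ===== PORT A =====
def solution (absolutes : List Int) (signs : List Bool) : Int :=
  (PySem.List.pyRange 0 (absolutes.length : Int) 1).foldl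
    (fun answer idx =>
      if PySem.List.pyGetD signs idx false = false then
        answer - PySem.List.pyGetD absolutes idx 0
      else
        answer + PySem.List.pyGetD absolutes idx 0)
    0

-- ===== PORT B =====
-- lo, hi are nonnegative Python ints throughout B's recursion, so Nat with Nat division
-- transcribes (lo + hi) // 2 exactly; list indexing goes through PySem.List.pyGetD as in A.
def solutionGo (absolutes : List Int) (signs : List Bool) (lo hi : Nat) : Int :=
  if hi - lo = 0 then 0
  else if hi - lo = 1 then
    (if PySem.List.pyGetD signs (lo : Int) false then PySem.List.pyGetD absolutes (lo : Int) 0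
     else -PySem.List.pyGetD absolutes (lo : Int) 0)
  else
    solutionGo absolutes signs lo ((lo + hi) / 2) + solutionGo absolutes signs ((lo + hi) / 2) hi
termination_by hi - lo
decreasing_by all_goals omega

def solution_alt (absolutes : List Int) (signs : List Bool) : Int :=
  solutionGo absolutes signs 0 absolutes.length

-- ===== PRECONDITION & SPEC =====
-- Pre_ excludes exactly the inputs where Python A raises IndexError: signs shorter than absolutes.
def Pre_solution (absolutes : List Int) (signs : List Bool) : Prop :=
  absolutes.length ≤ signs.length
instance (absolutes : List Int) (signs : List Bool) : Decidable (Pre_solution absolutes signs) := by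
  unfold Pre_solution; infer_instance
def pvWitness_solution : List Int × List Bool := ([4, 7, 12], [true, false, true])
def Spec_solution (absolutes : List Int) (signs : List Bool) (out : Int) : Prop := out = solution_alt absolutes signs
instance (absolutes : List Int) (signs : List Bool) (out : Int) : Decidable (Spec_solution absolutes signs out) := by unfold Spec_solution; infer_instance

-- ===== CLAIM =====
def Claim_equal_solution : Prop := ∀ (absolutes : List Int) (signs : List Bool), Dom_solution absolutes signs → Pre_solution absolutes signs → Spec_solution absolutes signs (solution absolutes signs)

-- ===== LEMMAS AND PROOFS =====

-- the signed term contributed by index i (shared characterisation of both programs)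
def pvTerm (absolutes : List Int) (signs : List Bool) (i : Int) : Int :=
  if PySem.List.pyGetD signs i false then PySem.List.pyGetD absolutes i 0
  else -PySem.List.pyGetD absolutes i 0

-- A's accumulator fold is the sum of the signed terms
theorem pv_foldA (absolutes : List Int) (signs : List Bool) :
    ∀ (idxs : List Int) (t : Int),
      idxs.foldl
        (fun answer idx =>
          if PySem.List.pyGetD signs idx false = false then
            answer - PySem.List.pyGetD absolutes idx 0
          else answer + PySem.List.pyGetD absolutes idx 0)
        t
      = t + (idxs.map (pvTerm absolutes signs)).sum := by
  intro idxs
  induction idxs with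
  | nil => intro t; simp
  | cons i rest ih =>
    intro t
    simp only [List.foldl_cons, List.map_cons, List.sum_cons, pvTerm]
    by_cases h : PySem.List.pyGetD signs i false = false
    · rw [if_pos h, if_neg (by simp [h]), ih]; ring
    · rw [if_neg h, if_pos (by revert h; cases PySem.List.pyGetD signs i false <;> simp), ih]; ring

-- B's divide-and-conquer over [lo, hi) is the sum of the signed terms over range' lo (hi-lo)
theorem pv_go_sum (absolutes : List Int) (signs : List Bool) :
    ∀ (n lo hi : Nat), hi - lo = n →
      solutionGo absolutes signs lo hi
        = ((List.range' lo n).map (fun (k : Nat) => pvTerm absolutes signs (k : Int))).sum := by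
  intro n
  induction n using Nat.strong_induction_on with
  | _ n ih =>
    intro lo hi hn
    rw [solutionGo]
    rcases Nat.lt_or_ge n 2 with h2 | h2
    · interval_cases n
      · simp [hn]
      · rw [if_neg (by omega), if_pos hn]
        simp [pvTerm]
    · rw [if_neg (by omega), if_neg (by omega)]
      set mid := (lo + hi) / 2 with hmid
      have hb : lo < mid ∧ mid < hi := by omega
      have h1 : mid - lo < n := by omega
      have hh : hi - mid < n := by omega
      rw [ih (mid - lo) h1 lo mid rfl, ih (hi - mid) hh mid hi rfl]
      have hsplit : List.range' lo n = List.range' lo (mid - lo) ++ List.range' mid (hi - mid) := by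
        have h := List.range'_append (s := lo) (m := mid - lo) (n := hi - mid) (step := 1)
        rw [show lo + 1 * (mid - lo) = mid by omega, show (mid - lo) + (hi - mid) = n by omega] at h
        exact h.symm
      rw [hsplit, List.map_append, List.sum_append]

-- ===== VERDICT =====
theorem solution_spec : Claim_equal_solution := by
  intro absolutes signs _ _
  unfold Spec_solution solution solution_alt
  rw [pv_foldA, pv_go_sum absolutes signs absolutes.length 0 absolutes.length (by omega)]
  simp [PySem.List.pyRange_one, List.range_eq_range', pvTerm, List.map_map, Function.comp_def]
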